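-- pv_equiv track=rewrite | github.com/rksingh1713/HackerRank-Prepare-Solutions | Mathematics/Number Theory/Mehta-and-his-Laziness.py | solve
-- ===== SOURCE A (Python) =====
-- import math
--
-- def solve(n):
--     divisors = set()
--     # collect all divisors
--     for i in range(1, int(math.sqrt(n)) + 1):
--         if n % i == 0:
--             divisors.add(i)
--             divisors.add(n // i)
--
--     divisors.discard(n)  # remove n itself (proper divisors only)
--
--     if not divisors:
--         return "0"
--
--     total = len(divisors)
--     count = 0
--
--     for d in divisors:
--         if d % 2 == 0:  # even check
--             root = int(math.isqrt(d))
--             if root * root == d:  # perfect square check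
--                 count += 1
--
--     if count == 0:
--         return "0"
--
--     g = math.gcd(count, total)
--     return f"{count // g}/{total // g}"
-- ===== SOURCE B (Python) =====
-- import math
--
-- def solve(n):
--     lim = math.isqrt(n)
--     total = 0
--     for i in range(1, lim + 1):
--         if n % i == 0:
--             total += 1 if i * i == n else 2
--     if n >= 1:
--         total -= 1  # n itself is not a proper divisor
--     if total <= 0:
--         return "0"
--     count = 0
--     for r in range(2, lim + 1, 2):
--         if n % (r * r) == 0 and r * r != n:
--             count += 1
--     if count == 0:
--         return "0"
--     g = math.gcd(count, total)
--     return f"{count // g}/{total // g}"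
-- ===== Notes on version B (the rewrite author's own statement) =====
-- stated objective: alternative
-- what changed: B never materialises the divisor set: it counts proper divisors arithmetically inside the trapdoor loop and counts even perfect-square divisors directly by enumerating their even roots r with r*r dividing n, instead of collecting all divisors into a set and testing each.
import Mathlib
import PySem

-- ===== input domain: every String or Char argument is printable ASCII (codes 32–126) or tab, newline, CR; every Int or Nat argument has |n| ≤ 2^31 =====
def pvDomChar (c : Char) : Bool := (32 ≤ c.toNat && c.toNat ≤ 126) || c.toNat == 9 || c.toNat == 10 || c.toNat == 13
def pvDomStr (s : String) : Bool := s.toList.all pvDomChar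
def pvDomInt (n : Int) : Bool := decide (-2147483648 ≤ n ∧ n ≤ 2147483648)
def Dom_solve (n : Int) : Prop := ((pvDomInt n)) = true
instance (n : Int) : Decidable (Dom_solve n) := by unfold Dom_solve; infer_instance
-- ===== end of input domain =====

-- B replaces A's divisor set by pure counting: the trapdoor loop counts proper divisors
-- arithmetically, and even perfect-square divisors are counted by enumerating their even roots.

-- ===== PORT A =====
-- int(math.sqrt(n)) and math.isqrt(d) are ported as Nat.sqrt, exact for 0 ≤ n ≤ 2^31
-- (math.sqrt is correctly rounded, so int(math.sqrt(n)) = isqrt(n) on this domain);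
-- math.sqrt raises ValueError for n < 0, which Pre_solve excludes.
def solveStep (n : Int) (s : PySem.Set Int) (i : Int) : PySem.Set Int :=
  if PySem.Int.mod n i = 0 then
    PySem.Set.add (PySem.Set.add s i) (PySem.Int.floordiv n i)
  else s

def solve (n : Int) : String :=
  let divisors0 : PySem.Set Int :=
    (PySem.List.pyRange 1 ((Nat.sqrt n.toNat : Int) + 1) 1).foldl (solveStep n) PySem.Set.empty
  let divisors : PySem.Set Int := PySem.Set.discard divisors0 n
  if divisors = [] then "0"
  else
    let total : Int := PySem.Set.len divisors
    -- the loop over the set computes a count, which does not depend on iteration order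
    let count : Int := divisors.foldl
      (fun c d =>
        if PySem.Int.mod d 2 = 0 then
          if (Nat.sqrt d.toNat : Int) * (Nat.sqrt d.toNat : Int) = d then c + 1 else c
        else c) 0
    if count = 0 then "0"
    else
      let g : Int := (Int.gcd count total : Int)
      PySem.Int.toStr (PySem.Int.floordiv count g) ++ "/" ++ PySem.Int.toStr (PySem.Int.floordiv total g)

-- ===== PORT B =====
def solve_alt (n : Int) : String :=
  let lim : Int := (Nat.sqrt n.toNat : Int)
  let total0 : Int := (PySem.List.pyRange 1 (lim + 1) 1).foldl
    (fun t i => if PySem.Int.mod n i = 0 then (if i * i = n then t + 1 else t + 2) else t) 0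
  let total : Int := if 1 ≤ n then total0 - 1 else total0
  if total ≤ 0 then "0"
  else
    let count : Int := (PySem.List.pyRange 2 (lim + 1) 2).foldl
      (fun c r => if PySem.Int.mod n (r * r) = 0 ∧ ¬r * r = n then c + 1 else c) 0
    if count = 0 then "0"
    else
      let g : Int := (Int.gcd count total : Int)
      PySem.Int.toStr (PySem.Int.floordiv count g) ++ "/" ++ PySem.Int.toStr (PySem.Int.floordiv total g)

-- ===== PRECONDITION & SPEC =====
-- math.sqrt(n) raises ValueError for n < 0 (so does math.isqrt in B), so Pre_ is 0 ≤ n.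
def Pre_solve (n : Int) : Prop := 0 ≤ n
instance (n : Int) : Decidable (Pre_solve n) := by unfold Pre_solve; infer_instance
def pvWitness_solve : Int := 12

def Spec_solve (n : Int) (out : String) : Prop := out = solve_alt n
instance (n : Int) (out : String) : Decidable (Spec_solve n out) := by unfold Spec_solve; infer_instance

-- ===== CLAIM (what is proved, stated in full; the proofs are below) =====
def Claim_equal_solve : Prop := ∀ (n : Int), Dom_solve n → Pre_solve n → Spec_solve n (solve n)

-- ===== LEMMAS AND PROOFS =====

-- A's divisor set, resp. B's divisor tally, after processing i = 1 .. k
def aset (n : Int) (k : Nat) : PySem.Set Int :=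
  (PySem.List.pyRange 1 ((k : Int) + 1) 1).foldl (solveStep n) PySem.Set.empty

def btot (n : Int) (k : Nat) : Int :=
  (PySem.List.pyRange 1 ((k : Int) + 1) 1).foldl
    (fun t i => if PySem.Int.mod n i = 0 then (if i * i = n then t + 1 else t + 2) else t) 0

-- how the invariant's membership condition changes when the loop bound grows by one
theorem memStep (n x : Int) (k : Nat) (hn : 2 ≤ n) (hd : x ∣ n) (hx1 : 1 ≤ x) :
    (x ≤ (k : Int) + 1 ∨ n ≤ x * ((k : Int) + 1)) ↔
      ((x ≤ (k : Int) ∨ n ≤ x * k) ∨ x = (k : Int) + 1 ∨ x * ((k : Int) + 1) = n) := by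
  obtain ⟨c, hc⟩ := hd
  have hc1 : 1 ≤ c := by
    by_contra h
    push_neg at h
    have : x * c ≤ 0 := mul_nonpos_of_nonneg_of_nonpos (by omega) (by omega)
    omega
  have key : ∀ m : Int, n ≤ x * m ↔ c ≤ m := by
    intro m
    rw [hc]
    exact ⟨fun h => le_of_mul_le_mul_left h (by omega),
           fun h => mul_le_mul_of_nonneg_left h (by omega)⟩
  have key2 : x * ((k : Int) + 1) = n ↔ c = (k : Int) + 1 := by
    rw [hc]
    exact ⟨fun h => (mul_left_cancel₀ (by omega) h).symm, fun h => by rw [h]⟩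
  rw [key, key, key2]
  omega

-- Joint loop invariant: A's set is nodup, B's tally equals its size, and the set holds
-- exactly the divisors x of n with x ≤ k or n/x ≤ k.
theorem asetInv (n : Int) (hn : 2 ≤ n) (k : Nat) (hk : ((k : Int) + 1) * ((k : Int) + 1) ≤ n + 2 * k + 1) :
    (aset n k).Nodup ∧ btot n k = ((aset n k).length : Int) ∧
    ∀ x : Int, x ∈ aset n k ↔ x ∣ n ∧ 1 ≤ x ∧ (x ≤ (k : Int) ∨ n ≤ x * k) := by
  induction k with
  | zero =>
      have h : PySem.List.pyRange 1 (((0:Nat) : Int) + 1) 1 = [] := by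
        rw [PySem.List.pyRange_one_eq_nil] <;> norm_num
      refine ⟨?_, ?_, ?_⟩
      · simp [aset, h]
      · simp [aset, btot, h]
      · intro x
        simp only [aset, h, List.foldl_nil]
        simp only [PySem.Set.empty, List.not_mem_nil, false_iff]
        rintro ⟨hd, hx1, hor⟩
        rcases hor with h1 | h1
        · omega
        · have : x * ((0:Nat) : Int) = 0 := by push_cast; ring
          omega
  | succ k ih =>
      have hk1 : ((k+1 : Nat) : Int) = (k : Int) + 1 := by push_cast; ring
      have hknn : (0:Int) ≤ (k : Int) := Int.natCast_nonneg k
      have hi2 : ((k : Int) + 1) * ((k : Int) + 1) ≤ n := by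
        have h := hk1 ▸ hk
        nlinarith
      obtain ⟨hnd, hbt, hmem⟩ := ih (by nlinarith)
      have hrange : PySem.List.pyRange 1 (((k+1 : Nat) : Int) + 1) 1
          = PySem.List.pyRange 1 ((k : Int) + 1) 1 ++ [(k : Int) + 1] := by
        rw [hk1, PySem.List.pyRange_one_succ_right (by omega)]
      have hA : aset n (k+1) = solveStep n (aset n k) ((k : Int) + 1) := by
        unfold aset; rw [hrange, List.foldl_append]; rfl
      have hB : btot n (k+1) =
          (if PySem.Int.mod n ((k : Int) + 1) = 0 then
            (if ((k : Int) + 1) * ((k : Int) + 1) = n then btot n k + 1 else btot n k + 2)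
          else btot n k) := by
        unfold btot; rw [hrange, List.foldl_append]; rfl
      by_cases hdvd : ((k : Int) + 1) ∣ n
      · -- i = k+1 divides n
        have hmod : PySem.Int.mod n ((k : Int) + 1) = 0 :=
          (PySem.Int.mod_eq_zero_iff_dvd n _).mpr hdvd
        have hi0 : (0:Int) < (k : Int) + 1 := by omega
        have hq : PySem.Int.floordiv n ((k : Int) + 1) * ((k : Int) + 1) = n := by
          rw [PySem.Int.floordiv_eq_ediv_of_pos hi0]; exact Int.ediv_mul_cancel hdvd
        set q : Int := PySem.Int.floordiv n ((k : Int) + 1) with hqdef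
        have hqd : q ∣ n := ⟨(k : Int) + 1, hq.symm⟩
        have hiq : (k : Int) + 1 ≤ q :=
          le_of_mul_le_mul_right (by rw [hq]; exact hi2) hi0
        have hinotmem : ((k : Int) + 1) ∉ aset n k := by
          rw [hmem]
          rintro ⟨_, _, h1 | h1⟩
          · omega
          · have h2 : ((k : Int) + 1) * (k : Int) < ((k : Int) + 1) * ((k : Int) + 1) :=
              mul_lt_mul_of_pos_left (by omega) hi0
            nlinarith
        have hset1 : PySem.Set.add (aset n k) ((k : Int) + 1) = aset n k ++ [(k : Int) + 1] :=
          PySem.Set.add_of_not_mem hinotmem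
        by_cases hqi : q = (k : Int) + 1
        · -- perfect-square pivot: q = i, one element added
          have hii : ((k : Int) + 1) * ((k : Int) + 1) = n := by rw [hqi] at hq; exact hq
          have hset2 : aset n (k+1) = aset n k ++ [(k : Int) + 1] := by
            rw [hA, solveStep, if_pos hmod, ← hqdef, hqi, hset1]
            exact PySem.Set.add_of_mem (by simp)
          refine ⟨?_, ?_, ?_⟩
          · rw [hset2]
            have d1 : (aset n k).Disjoint [(k : Int) + 1] := by
              intro a ha hb
              simp only [List.mem_singleton] at hb
              exact hinotmem (hb ▸ ha)
            exact hnd.append (List.nodup_singleton _) d1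
          · rw [hset2, hB, if_pos hmod, if_pos hii, hbt]
            simp
          · intro x
            rw [hset2]
            simp only [List.mem_append, List.mem_singleton, hmem]
            constructor
            · rintro (⟨hd, hx1, hor⟩ | rfl)
              · exact ⟨hd, hx1, by rw [hk1, memStep n x k hn hd hx1]; left; exact hor⟩
              · exact ⟨hdvd, by omega, by rw [hk1]; left; omega⟩
            · rintro ⟨hd, hx1, hor⟩
              rw [hk1, memStep n x k hn hd hx1] at hor
              rcases hor with hor | hxi | hxq
              · exact Or.inl ⟨hd, hx1, hor⟩
              · exact Or.inr hxi
              · -- x * (k+1) = n = (k+1)², so x = k+1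
                right
                have : x * ((k : Int) + 1) = ((k : Int) + 1) * ((k : Int) + 1) := by
                  rw [hxq, hii]
                exact mul_right_cancel₀ (by omega) this
        · -- two distinct elements i < q added
          have hii : ¬ ((k : Int) + 1) * ((k : Int) + 1) = n := by
            intro h
            exact hqi (mul_right_cancel₀ (by omega) (hq.trans h.symm))
          have hqgt : (k : Int) + 1 < q := lt_of_le_of_ne hiq (fun h => hqi h.symm)
          have hq1 : (1:Int) ≤ q := by omega
          have hqnotmem : q ∉ aset n k := by
            rw [hmem]
            rintro ⟨_, _, h1 | h1⟩
            · omega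
            · have h2 : q * (k : Int) < q * ((k : Int) + 1) :=
                mul_lt_mul_of_pos_left (by omega) (by omega)
              rw [mul_comm q ((k : Int) + 1)] at h2
              nlinarith
          have hset2 : aset n (k+1) = aset n k ++ [(k : Int) + 1] ++ [q] := by
            rw [hA, solveStep, if_pos hmod, ← hqdef, hset1]
            refine PySem.Set.add_of_not_mem ?_
            simp only [List.mem_append, List.mem_singleton]
            rintro (h | h)
            · exact hqnotmem h
            · omega
          refine ⟨?_, ?_, ?_⟩
          · rw [hset2]
            have d1 : (aset n k).Disjoint [(k : Int) + 1] := by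
              intro a ha hb
              simp only [List.mem_singleton] at hb
              exact hinotmem (hb ▸ ha)
            have d2 : (aset n k ++ [(k : Int) + 1]).Disjoint [q] := by
              intro a ha hb
              simp only [List.mem_singleton] at hb
              subst hb
              rcases List.mem_append.mp ha with h | h
              · exact hqnotmem h
              · simp only [List.mem_singleton] at h; omega
            exact ((hnd.append (List.nodup_singleton _) d1).append (List.nodup_singleton _) d2)
          · rw [hset2, hB, if_pos hmod, if_neg hii, hbt]
            simp only [List.length_append, List.length_singleton]
            push_cast
            ring
          · intro x
            rw [hset2]
            simp only [List.mem_append, List.mem_singleton, hmem]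
            constructor
            · rintro ((⟨hd, hx1, hor⟩ | rfl) | rfl)
              · exact ⟨hd, hx1, by rw [hk1, memStep n x k hn hd hx1]; left; exact hor⟩
              · exact ⟨hdvd, by omega, by rw [hk1]; left; omega⟩
              · refine ⟨hqd, hq1, ?_⟩
                rw [hk1, memStep n q k hn hqd hq1]
                right; right; exact hq
            · rintro ⟨hd, hx1, hor⟩
              rw [hk1, memStep n x k hn hd hx1] at hor
              rcases hor with hor | hxi | hxq
              · exact Or.inl (Or.inl ⟨hd, hx1, hor⟩)
              · exact Or.inl (Or.inr hxi)
              · right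
                exact mul_right_cancel₀ (show ((k : Int) + 1) ≠ 0 by omega)
                  (hxq.trans hq.symm)
      · -- i = k+1 does not divide n: nothing changes
        have hmod : ¬ PySem.Int.mod n ((k : Int) + 1) = 0 := by
          rw [PySem.Int.mod_eq_zero_iff_dvd]; exact hdvd
        have hset2 : aset n (k+1) = aset n k := by
          rw [hA, solveStep, if_neg hmod]
        refine ⟨hset2 ▸ hnd, by rw [hset2, hB, if_neg hmod, hbt], ?_⟩
        intro x
        rw [hset2, hmem]
        constructor
        · rintro ⟨hd, hx1, hor⟩
          exact ⟨hd, hx1, by rw [hk1, memStep n x k hn hd hx1]; left; exact hor⟩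
        · rintro ⟨hd, hx1, hor⟩
          rw [hk1, memStep n x k hn hd hx1] at hor
          refine ⟨hd, hx1, ?_⟩
          rcases hor with hor | hxi | hxq
          · exact hor
          · exact absurd (hxi ▸ hd) hdvd
          · exact absurd ⟨x, by rw [← hxq]; ring⟩ hdvd

-- bounds for L = isqrt(n)
theorem sqrtBounds (n : Int) (hn : 0 ≤ n) :
    ((Nat.sqrt n.toNat : Int)) * (Nat.sqrt n.toNat : Int) ≤ n ∧
    n < ((Nat.sqrt n.toNat : Int) + 1) * ((Nat.sqrt n.toNat : Int) + 1) := by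
  have h1 := Nat.sqrt_le' n.toNat
  have h2 := Nat.lt_succ_sqrt' n.toNat
  rw [pow_two] at h1 h2
  have hnn : ((n.toNat : Int)) = n := Int.toNat_of_nonneg hn
  constructor
  · calc ((Nat.sqrt n.toNat : Int)) * (Nat.sqrt n.toNat : Int)
        = ((Nat.sqrt n.toNat * Nat.sqrt n.toNat : Nat) : Int) := by push_cast; ring
      _ ≤ ((n.toNat : Int)) := by exact_mod_cast h1
      _ = n := hnn
  · calc n = ((n.toNat : Int)) := hnn.symm
      _ < ((Nat.sqrt n.toNat |>.succ) * (Nat.sqrt n.toNat |>.succ) : Nat) := by exact_mod_cast h2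
      _ = ((Nat.sqrt n.toNat : Int) + 1) * ((Nat.sqrt n.toNat : Int) + 1) := by push_cast; ring

-- at k = isqrt(n) the set is exactly the set of positive divisors of n
theorem asetTop (n : Int) (hn : 2 ≤ n) :
    ∀ x : Int, x ∈ aset n (Nat.sqrt n.toNat) ↔ x ∣ n ∧ 1 ≤ x := by
  obtain ⟨hL1, hL2⟩ := sqrtBounds n (by omega)
  obtain ⟨_, _, hmem⟩ := asetInv n hn (Nat.sqrt n.toNat) (by nlinarith [Int.natCast_nonneg (Nat.sqrt n.toNat)])
  intro x
  rw [hmem]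
  constructor
  · rintro ⟨hd, hx1, _⟩; exact ⟨hd, hx1⟩
  · rintro ⟨hd, hx1⟩
    refine ⟨hd, hx1, ?_⟩
    by_cases hx : x ≤ (Nat.sqrt n.toNat : Int)
    · exact Or.inl hx
    · push_neg at hx
      obtain ⟨c, hc⟩ := hd
      have hc1 : 1 ≤ c := by
        by_contra h
        push_neg at h
        have : x * c ≤ 0 := mul_nonpos_of_nonneg_of_nonpos (by omega) (by omega)
        omega
      right
      have hcle : c ≤ (Nat.sqrt n.toNat : Int) := by nlinarith
      calc n = x * c := hc
        _ ≤ x * (Nat.sqrt n.toNat : Int) := mul_le_mul_of_nonneg_left hcle (by omega)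

-- the even perfect-square proper divisors are exactly the squares of the even r ≤ isqrt(n)
theorem countBij (n : Int) (hn : 2 ≤ n) (S' : List Int) (hnd : S'.Nodup)
    (hmem : ∀ x : Int, x ∈ S' ↔ x ∣ n ∧ 1 ≤ x ∧ x ≠ n) :
    S'.countP (fun d => decide (PySem.Int.mod d 2 = 0 ∧
        (Nat.sqrt d.toNat : Int) * (Nat.sqrt d.toNat : Int) = d))
      = (PySem.List.pyRange 2 ((Nat.sqrt n.toNat : Int) + 1) 2).countP
          (fun r => decide (PySem.Int.mod n (r * r) = 0 ∧ ¬r * r = n)) := by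
  obtain ⟨hL1, hL2⟩ := sqrtBounds n (by omega)
  have hR2mem : ∀ r : Int, r ∈ PySem.List.pyRange 2 ((Nat.sqrt n.toNat : Int) + 1) 2 ↔
      2 ≤ r ∧ r < (Nat.sqrt n.toNat : Int) + 1 ∧ 2 ∣ r - 2 :=
    PySem.List.mem_pyRange_iff_of_pos (by norm_num)
  have hR2nodup : (PySem.List.pyRange 2 ((Nat.sqrt n.toNat : Int) + 1) 2).Nodup := by
    rw [PySem.List.pyRange_of_pos _ _ (by norm_num : (0:Int) < 2)]
    exact List.nodup_range.map (fun a b h => by omega)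
  rw [List.countP_eq_length_filter, List.countP_eq_length_filter]
  have hperm : (S'.filter (fun d => decide (PySem.Int.mod d 2 = 0 ∧
        (Nat.sqrt d.toNat : Int) * (Nat.sqrt d.toNat : Int) = d))).Perm
      (((PySem.List.pyRange 2 ((Nat.sqrt n.toNat : Int) + 1) 2).filter
          (fun r => decide (PySem.Int.mod n (r * r) = 0 ∧ ¬r * r = n))).map (fun r => r * r)) := by
    rw [List.perm_ext_iff_of_nodup (hnd.filter _) ?nd2]
    case nd2 =>
      refine (hR2nodup.filter _).map_on ?_
      intro x hx y hy h
      have hx2 : 2 ≤ x := ((hR2mem x).mp (List.mem_of_mem_filter hx)).1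
      have hy2 : 2 ≤ y := ((hR2mem y).mp (List.mem_of_mem_filter hy)).1
      have h0 : (x - y) * (x + y) = 0 := by ring_nf; nlinarith [h]
      rcases mul_eq_zero.mp h0 with h1 | h1 <;> omega
    intro x
    simp only [List.mem_filter, List.mem_map, hmem, hR2mem, decide_eq_true_eq]
    constructor
    · rintro ⟨⟨hd, hx1, hxn⟩, heven, hsq⟩
      have h2x : (2:Int) ∣ x := (PySem.Int.mod_eq_zero_iff_dvd x 2).mp heven
      have h2s : (2:Int) ∣ (Nat.sqrt x.toNat : Int) :=
        Int.prime_two.dvd_of_dvd_pow (n := 2) (by rw [pow_two]; rwa [← hsq] at h2x)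
      have hs0 : (0:Int) ≤ (Nat.sqrt x.toNat : Int) := Int.natCast_nonneg _
      have hs1 : (Nat.sqrt x.toNat : Int) ≠ 0 := by
        intro h; rw [h] at hsq; omega
      have hxle : x ≤ n := Int.le_of_dvd (by omega) hd
      have hsle : (Nat.sqrt x.toNat : Int) < (Nat.sqrt n.toNat : Int) + 1 := by
        by_contra h
        push_neg at h
        nlinarith
      refine ⟨(Nat.sqrt x.toNat : Int), ⟨⟨by omega, hsle, by omega⟩, ?_, ?_⟩, hsq⟩
      · rw [PySem.Int.mod_eq_zero_iff_dvd, hsq]; exact hd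
      · rw [hsq]; exact hxn
    · rintro ⟨r, ⟨⟨hr2, hrle, hrdvd⟩, hmodr, hrn⟩, rfl⟩
      have hd : r * r ∣ n := (PySem.Int.mod_eq_zero_iff_dvd n (r * r)).mp hmodr
      have h2r : (2:Int) ∣ r := by omega
      refine ⟨⟨hd, by nlinarith, hrn⟩, ?_, ?_⟩
      · rw [PySem.Int.mod_eq_zero_iff_dvd]
        exact Dvd.dvd.mul_right h2r r
      · obtain ⟨m, rfl⟩ : ∃ m : Nat, r = (m : Int) :=
          ⟨r.toNat, (Int.toNat_of_nonneg (by omega)).symm⟩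
        have hmm : ((m : Int) * (m : Int)).toNat = m * m := by
          rw [show ((m : Int) * (m : Int)) = ((m * m : Nat) : Int) by push_cast; ring]
          exact Int.toNat_natCast _
        rw [hmm, Nat.sqrt_eq]
  rw [hperm.length_eq, List.length_map]

-- ===== VERDICT (by name: the statement is the Claim_ definition above) =====
theorem solve_spec : Claim_equal_solve := by
  intro n _ hpre
  unfold Spec_solve
  by_cases h0 : n = 0
  · subst h0; decide
  by_cases h1 : n = 1
  · subst h1; decide
  have hn : 2 ≤ n := by unfold Pre_solve at hpre; omega
  -- name the shared quantities
  obtain ⟨hL1, hL2⟩ := sqrtBounds n (by omega)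
  obtain ⟨hnd, hbt, _⟩ := asetInv n hn (Nat.sqrt n.toNat)
    (by nlinarith [Int.natCast_nonneg (Nat.sqrt n.toNat)])
  have hTop := asetTop n hn
  have hnS : n ∈ aset n (Nat.sqrt n.toNat) := (hTop n).mpr ⟨dvd_refl n, by omega⟩
  have hS'nd : (PySem.Set.discard (aset n (Nat.sqrt n.toNat)) n).Nodup :=
    PySem.Set.nodup_discard _ _ hnd
  have hS'mem : ∀ x : Int, x ∈ PySem.Set.discard (aset n (Nat.sqrt n.toNat)) n ↔
      x ∣ n ∧ 1 ≤ x ∧ x ≠ n := by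
    intro x
    rw [PySem.Set.mem_discard, hTop]
    tauto
  have h1S' : (1:Int) ∈ PySem.Set.discard (aset n (Nat.sqrt n.toNat)) n :=
    (hS'mem 1).mpr ⟨one_dvd n, le_refl 1, by omega⟩
  have hne : PySem.Set.discard (aset n (Nat.sqrt n.toNat)) n ≠ [] :=
    List.ne_nil_of_mem h1S'
  have hlen : (aset n (Nat.sqrt n.toNat)).length
      = (PySem.Set.discard (aset n (Nat.sqrt n.toNat)) n).length + 1 := by
    have e1 : (PySem.Set.discard (aset n (Nat.sqrt n.toNat)) n).toFinset
        = (aset n (Nat.sqrt n.toNat)).toFinset.erase n := by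
      ext x
      simp only [List.mem_toFinset, Finset.mem_erase, PySem.Set.mem_discard]
      tauto
    have e2 := Finset.card_erase_of_mem (List.mem_toFinset.mpr hnS)
    rw [← e1, List.toFinset_card_of_nodup hS'nd, List.toFinset_card_of_nodup hnd] at e2
    have h3 : 0 < (aset n (Nat.sqrt n.toNat)).length := List.length_pos_of_mem hnS
    omega
  have hcnt := countBij n hn _ hS'nd hS'mem
  -- unfold the two programs
  simp only [solve, solve_alt]
  rw [show (PySem.List.pyRange 1 ((Nat.sqrt n.toNat : Int) + 1) 1).foldl (solveStep n)
        PySem.Set.empty = aset n (Nat.sqrt n.toNat) from rfl]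
  rw [show (PySem.List.pyRange 1 ((Nat.sqrt n.toNat : Int) + 1) 1).foldl
        (fun t i => if PySem.Int.mod n i = 0 then (if i * i = n then t + 1 else t + 2) else t) 0
        = btot n (Nat.sqrt n.toNat) from rfl]
  rw [if_neg hne, if_pos (show (1:Int) ≤ n by omega)]
  -- both totals are |S'|
  have htotB : btot n (Nat.sqrt n.toNat) - 1
      = ((PySem.Set.discard (aset n (Nat.sqrt n.toNat)) n).length : Int) := by
    rw [hbt, hlen]; push_cast; ring
  have htotA : PySem.Set.len (PySem.Set.discard (aset n (Nat.sqrt n.toNat)) n)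
      = ((PySem.Set.discard (aset n (Nat.sqrt n.toNat)) n).length : Int) := by
    simp [PySem.Set.len]
  have hS'pos : 0 < (PySem.Set.discard (aset n (Nat.sqrt n.toNat)) n).length :=
    List.length_pos_of_mem h1S'
  rw [htotB, htotA, if_neg (show ¬ ((((PySem.Set.discard (aset n (Nat.sqrt n.toNat)) n).length : Int)) ≤ 0) by
    push_cast; omega)]
  -- both counts are the same countP
  have hcA : (PySem.Set.discard (aset n (Nat.sqrt n.toNat)) n).foldl
      (fun c d =>
        if PySem.Int.mod d 2 = 0 then
          if (Nat.sqrt d.toNat : Int) * (Nat.sqrt d.toNat : Int) = d then c + 1 else c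
        else c) 0
      = (((PySem.Set.discard (aset n (Nat.sqrt n.toNat)) n).countP
          (fun d => decide (PySem.Int.mod d 2 = 0 ∧
            (Nat.sqrt d.toNat : Int) * (Nat.sqrt d.toNat : Int) = d)) : Nat) : Int) := by
    rw [PySem.List.foldl_congr_mem _ _
      (fun c d => if PySem.Int.mod d 2 = 0 ∧
        (Nat.sqrt d.toNat : Int) * (Nat.sqrt d.toNat : Int) = d then c + 1 else c) 0
      (by
        intro acc x _
        by_cases hp1 : PySem.Int.mod x 2 = 0 <;>
          by_cases hp2 : (Nat.sqrt x.toNat : Int) * (Nat.sqrt x.toNat : Int) = x <;>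
          simp [hp1, hp2])]
    rw [PySem.List.foldl_ite_add_one]
    simp
  have hcB : (PySem.List.pyRange 2 ((Nat.sqrt n.toNat : Int) + 1) 2).foldl
      (fun c r => if PySem.Int.mod n (r * r) = 0 ∧ ¬r * r = n then c + 1 else c) 0
      = (((PySem.List.pyRange 2 ((Nat.sqrt n.toNat : Int) + 1) 2).countP
          (fun r => decide (PySem.Int.mod n (r * r) = 0 ∧ ¬r * r = n)) : Nat) : Int) := by
    rw [PySem.List.foldl_ite_add_one]
    simp
  rw [hcA, hcB, hcnt]
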